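-- pv_equiv track=rewrite | github.com/Digu-patil/PyLeetCode | GFGQuestions/NearToTen.py | NearToTen
-- ===== SOURCE A (Python) =====
-- def NearToTen(N):
--     if N % 10 == 0:
--         return True
--     ct = 1
--     lb = N
--     ub = N
--     while ct <= 2:
--         lb += 1
--         ub -= 1
--         if (lb % 10 == 0) or (ub % 10 == 0):
--             return True
--         ct += 1
--     return False
-- ===== SOURCE B (Python) =====
-- def NearToTen(N):
--     return N % 10 in (0, 1, 2, 8, 9)
-- ===== Notes on version B (the rewrite author's own statement) =====
-- stated objective: simpler
-- what changed: Replaced the guard plus two-iteration widening loop over N±1, N±2 with a single membership test of N % 10 against the literal set {0,1,2,8,9}.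
import Mathlib
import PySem

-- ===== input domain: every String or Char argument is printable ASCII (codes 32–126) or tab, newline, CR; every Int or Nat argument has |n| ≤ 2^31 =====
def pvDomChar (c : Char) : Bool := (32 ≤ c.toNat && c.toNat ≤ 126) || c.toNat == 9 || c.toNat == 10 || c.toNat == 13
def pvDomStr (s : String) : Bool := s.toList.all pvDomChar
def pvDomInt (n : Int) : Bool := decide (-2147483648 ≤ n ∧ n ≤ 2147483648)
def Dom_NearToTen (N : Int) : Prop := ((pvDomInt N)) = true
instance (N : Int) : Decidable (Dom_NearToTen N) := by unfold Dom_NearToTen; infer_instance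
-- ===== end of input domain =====

-- B replaces A's widening loop with one membership test of N % 10 in {0,1,2,8,9} (simpler).

-- ===== PORT A =====
-- the while loop: state (lb, ub), runs while ct ≤ 2, i.e. twice; ported as recursion on the remaining count
def NearToTenLoop : Nat → Int → Int → Bool
  | 0, _, _ => false
  | k + 1, lb, ub =>
    let lb' := lb + 1
    let ub' := ub - 1
    if PySem.Int.mod lb' 10 == 0 || PySem.Int.mod ub' 10 == 0 then true
    else NearToTenLoop k lb' ub'

def NearToTen (N : Int) : Bool :=
  if PySem.Int.mod N 10 == 0 then true
  else NearToTenLoop 2 N N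

-- ===== PORT B =====
def NearToTen_alt (N : Int) : Bool :=
  let r := PySem.Int.mod N 10
  r == 0 || r == 1 || r == 2 || r == 8 || r == 9

-- ===== PRECONDITION & SPEC =====
def Spec_NearToTen (N : Int) (out : Bool) : Prop := out = NearToTen_alt N
instance (N : Int) (out : Bool) : Decidable (Spec_NearToTen N out) := by unfold Spec_NearToTen; infer_instance

-- ===== CLAIM (what is proved, stated in full; the proofs are below) =====
def Claim_equal_NearToTen : Prop := ∀ (N : Int), Dom_NearToTen N → Spec_NearToTen N (NearToTen N)

-- ===== LEMMAS AND PROOFS =====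
theorem pymod_ten_eq_emod (a : Int) : PySem.Int.mod a 10 = a % 10 :=
  PySem.Int.mod_eq_emod_of_pos (by norm_num)

-- ===== VERDICT (by name: the statement is the Claim_ definition above) =====
theorem NearToTen_spec : Claim_equal_NearToTen := by
  intro N _
  unfold Spec_NearToTen NearToTen NearToTen_alt NearToTenLoop
  simp only [pymod_ten_eq_emod, beq_iff_eq, Bool.or_eq_true]
  have h0 : 0 ≤ N % 10 := Int.emod_nonneg N (by norm_num)
  have h1 : N % 10 < 10 := Int.emod_lt_of_pos N (by norm_num)
  interval_cases h : (N % 10) <;>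
    simp [NearToTenLoop] <;> omega
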